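-- pv_equiv track=rewrite | github.com/Kiran9206/DSA | DAS/DSA_Arrays_1_One_Dimensional/Max_Sum_Contiguous_Subarray.py | min_product
-- ===== SOURCE A (Python) =====
-- def min_product(A: list)-> int:
--     if not A:
--         return 0
--     # step1: create 3 variables local_max, local_min, global_min and initialise the first element from the array value
--     local_max = local_min = global_min = A[0]
--     # step2: iterate the array starting from 1 to len(A)
--     for idx in range (1, len(A)):
--         cur_num = A[idx]
--         prev_max = local_max
--         prev_min = local_min
--         local_max = max(cur_num, cur_num * prev_max, cur_num * prev_min)
--         local_min = min(cur_num, cur_num * prev_max, cur_num * prev_min)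
--         # Update the global_max if the current local_max is greater
--         global_min = min(global_min, local_min)
--         # Return the global_max, which holds the maximum product of any subarray
--     return global_min
-- ===== SOURCE B (Python) =====
-- def min_product(A: list) -> int:
--     # Brute force: enumerate every contiguous subarray by start index,
--     # extending with a running product; track the global minimum.
--     if not A:
--         return 0
--     n = len(A)
--     global_min = A[0]
--     for i in range(n):
--         prod = 1
--         for j in range(i, n):
--             prod *= A[j]
--             if prod < global_min:
--                 global_min = prod
--     return global_min
-- ===== Notes on version B (the rewrite author's own statement) =====
-- stated objective: alternative
-- what changed: Replaces the O(n) Kadane-style min/max DP with a direct O(n^2) brute-force enumeration of all contiguous subarrays via a nested loop with a running product.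
import Mathlib
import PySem

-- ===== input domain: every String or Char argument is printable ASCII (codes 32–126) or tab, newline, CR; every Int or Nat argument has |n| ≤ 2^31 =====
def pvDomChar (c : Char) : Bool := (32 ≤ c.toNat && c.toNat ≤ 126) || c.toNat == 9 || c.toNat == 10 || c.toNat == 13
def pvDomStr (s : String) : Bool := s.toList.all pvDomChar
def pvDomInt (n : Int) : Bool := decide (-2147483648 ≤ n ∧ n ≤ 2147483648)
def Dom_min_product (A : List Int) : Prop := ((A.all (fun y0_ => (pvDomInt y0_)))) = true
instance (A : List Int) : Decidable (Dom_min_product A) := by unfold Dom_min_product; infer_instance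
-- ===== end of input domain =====

-- B replaces A's linear Kadane-style min/max product DP with a brute-force O(n^2)
-- enumeration of all contiguous subarrays (alternative algorithm, not faster).

-- ===== PORT A =====
def min_product (A : List Int) : Int :=
  match A with
  | [] => 0
  | a :: _ =>
    let st := (PySem.List.pyRange 1 (A.length : Int) 1).foldl
      (fun (s : Int × Int × Int) idx =>
        let cur := PySem.List.pyGetD A idx 0
        let prev_max := s.1
        let prev_min := s.2.1
        let local_max := max cur (max (cur * prev_max) (cur * prev_min))
        let local_min := min cur (min (cur * prev_max) (cur * prev_min))
        (local_max, local_min, min s.2.2 local_min)) (a, a, a)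
    st.2.2

-- ===== PORT B =====
def min_product_alt (A : List Int) : Int :=
  match A with
  | [] => 0
  | a :: _ =>
    (PySem.List.pyRange 0 (A.length : Int) 1).foldl
      (fun g i =>
        ((PySem.List.pyRange i (A.length : Int) 1).foldl
          (fun (p : Int × Int) j =>
            let prod := p.1 * PySem.List.pyGetD A j 0
            (prod, min p.2 prod)) (1, g)).2) a

-- ===== PRECONDITION & SPEC =====
def Spec_min_product (A : List Int) (out : Int) : Prop := out = min_product_alt A
instance (A : List Int) (out : Int) : Decidable (Spec_min_product A out) := by unfold Spec_min_product; infer_instance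

-- ===== CLAIM (what is proved, stated in full; the proofs are below) =====
def Claim_equal_min_product : Prop := ∀ (A : List Int), Dom_min_product A → Spec_min_product A (min_product A)

-- ===== LEMMAS AND PROOFS =====

-- The step of A's loop, with the lets expanded (definitionally the port's loop body).
def pvStepA (s : Int × Int × Int) (cur : Int) : Int × Int × Int :=
  (max cur (max (cur * s.1) (cur * s.2.1)),
   min cur (min (cur * s.1) (cur * s.2.1)),
   min s.2.2 (min cur (min (cur * s.1) (cur * s.2.1))))

-- The step of B's inner loop.
def pvStepInner (p : Int × Int) (x : Int) : Int × Int := (p.1 * x, min p.2 (p.1 * x))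

-- One iteration of B's outer loop, after bridging ranges/indexing to list folds.
def pvOuterB (A : List Int) (g : Int) (k : Nat) : Int :=
  ((A.drop k).foldl pvStepInner (1, g)).2

-- "R is the minimum product over all nonempty contiguous subarrays of A."
def pvMinSpec (A : List Int) (R : Int) : Prop :=
  (∃ l, l ≠ [] ∧ l <:+: A ∧ R = l.prod) ∧ ∀ l, l ≠ [] → l <:+: A → R ≤ l.prod

def pvEndMax (q : List Int) (m : Int) : Prop :=
  (∃ s, s ≠ [] ∧ s <:+ q ∧ m = s.prod) ∧ ∀ s, s ≠ [] → s <:+ q → s.prod ≤ m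

def pvEndMin (q : List Int) (m : Int) : Prop :=
  (∃ s, s ≠ [] ∧ s <:+ q ∧ m = s.prod) ∧ ∀ s, s ≠ [] → s <:+ q → m ≤ s.prod

def pvInvA (q : List Int) (st : Int × Int × Int) : Prop :=
  pvEndMax q st.1 ∧ pvEndMin q st.2.1 ∧ pvMinSpec q st.2.2

-- products of nonempty prefixes of s, each multiplied by c
def pvPrefProds : Int → List Int → List Int
  | _, [] => []
  | c, x :: s => (c * x) :: pvPrefProds (c * x) s

theorem pvMinSpec_unique (A : List Int) (R1 R2 : Int)
    (h1 : pvMinSpec A R1) (h2 : pvMinSpec A R2) : R1 = R2 := by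
  obtain ⟨⟨l1, hl1, hi1, hv1⟩, hb1⟩ := h1
  obtain ⟨⟨l2, hl2, hi2, hv2⟩, hb2⟩ := h2
  exact le_antisymm (hv2 ▸ hb1 l2 hl2 hi2) (hv1 ▸ hb2 l1 hl1 hi1)

theorem pv_suffix_snoc_of_suffix (t q : List Int) (x : Int) (h : t <:+ q) :
    t ++ [x] <:+ q ++ [x] := by
  obtain ⟨u, hu⟩ := h
  exact ⟨u, by rw [← List.append_assoc, hu]⟩

theorem pv_suffix_snoc_ne (s q : List Int) (x : Int) (hne : s ≠ []) (h : s <:+ q ++ [x]) :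
    ∃ t, t <:+ q ∧ s = t ++ [x] := by
  obtain ⟨u, hu⟩ := h
  have hs : s = s.dropLast ++ [s.getLast hne] := (List.dropLast_append_getLast hne).symm
  rw [hs, ← List.append_assoc] at hu
  rw [← List.concat_eq_append, ← List.concat_eq_append] at hu
  have hc := List.concat_inj.mp hu
  exact ⟨s.dropLast, ⟨u, hc.1⟩, by rw [← hc.2]; exact hs⟩

theorem pv_infix_snoc (s q : List Int) (x : Int) (h : s <:+: q ++ [x]) :
    s <:+: q ∨ s <:+ q ++ [x] := by
  obtain ⟨u, v, huv⟩ := h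
  rcases eq_or_ne v [] with rfl | hv
  · right; exact ⟨u, by simpa using huv⟩
  · left
    have hv2 : v = v.dropLast ++ [v.getLast hv] := (List.dropLast_append_getLast hv).symm
    rw [hv2, ← List.append_assoc] at huv
    rw [← List.concat_eq_append, ← List.concat_eq_append] at huv
    exact ⟨u, v.dropLast, (List.concat_inj.mp huv).1⟩

theorem pvEndMax_step (q : List Int) (pm pn x : Int)
    (hM : pvEndMax q pm) (hm : pvEndMin q pn) :
    pvEndMax (q ++ [x]) (max x (max (x * pm) (x * pn))) := by
  obtain ⟨⟨sM, hsM, hsMs, rfl⟩, hMub⟩ := hM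
  obtain ⟨⟨sm, hsm, hsms, rfl⟩, hmlb⟩ := hm
  constructor
  · rcases max_choice x (max (x * sM.prod) (x * sm.prod)) with h1 | h1
    · exact ⟨[x], by simp, ⟨q, rfl⟩, by simp [h1]⟩
    · rcases max_choice (x * sM.prod) (x * sm.prod) with h2 | h2
      · refine ⟨sM ++ [x], by simp, pv_suffix_snoc_of_suffix _ _ _ hsMs, ?_⟩
        rw [h1, h2]; simp [List.prod_append]; ring
      · refine ⟨sm ++ [x], by simp, pv_suffix_snoc_of_suffix _ _ _ hsms, ?_⟩
        rw [h1, h2]; simp [List.prod_append]; ring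
  · intro s hs hsx
    obtain ⟨t, htq, rfl⟩ := pv_suffix_snoc_ne s q x hs hsx
    rcases eq_or_ne t [] with rfl | ht
    · simp
    · have h1 : t.prod ≤ sM.prod := hMub t ht htq
      have h2 : sm.prod ≤ t.prod := hmlb t ht htq
      have hgoal : t.prod * x ≤ max (x * sM.prod) (x * sm.prod) := by
        rcases le_total 0 x with hx | hx
        · calc t.prod * x ≤ sM.prod * x := mul_le_mul_of_nonneg_right h1 hx
            _ = x * sM.prod := mul_comm _ _
            _ ≤ _ := le_max_left _ _
        · calc t.prod * x ≤ sm.prod * x := mul_le_mul_of_nonpos_right h2 hx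
            _ = x * sm.prod := mul_comm _ _
            _ ≤ _ := le_max_right _ _
      calc (t ++ [x]).prod = t.prod * x := by simp [List.prod_append]
        _ ≤ max (x * sM.prod) (x * sm.prod) := hgoal
        _ ≤ _ := le_max_right _ _

theorem pvEndMin_step (q : List Int) (pm pn x : Int)
    (hM : pvEndMax q pm) (hm : pvEndMin q pn) :
    pvEndMin (q ++ [x]) (min x (min (x * pm) (x * pn))) := by
  obtain ⟨⟨sM, hsM, hsMs, rfl⟩, hMub⟩ := hM
  obtain ⟨⟨sm, hsm, hsms, rfl⟩, hmlb⟩ := hm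
  constructor
  · rcases min_choice x (min (x * sM.prod) (x * sm.prod)) with h1 | h1
    · exact ⟨[x], by simp, ⟨q, rfl⟩, by simp [h1]⟩
    · rcases min_choice (x * sM.prod) (x * sm.prod) with h2 | h2
      · refine ⟨sM ++ [x], by simp, pv_suffix_snoc_of_suffix _ _ _ hsMs, ?_⟩
        rw [h1, h2]; simp [List.prod_append]; ring
      · refine ⟨sm ++ [x], by simp, pv_suffix_snoc_of_suffix _ _ _ hsms, ?_⟩
        rw [h1, h2]; simp [List.prod_append]; ring
  · intro s hs hsx
    obtain ⟨t, htq, rfl⟩ := pv_suffix_snoc_ne s q x hs hsx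
    rcases eq_or_ne t [] with rfl | ht
    · simp
    · have h1 : t.prod ≤ sM.prod := hMub t ht htq
      have h2 : sm.prod ≤ t.prod := hmlb t ht htq
      have hgoal : min (x * sM.prod) (x * sm.prod) ≤ t.prod * x := by
        rcases le_total 0 x with hx | hx
        · calc min (x * sM.prod) (x * sm.prod) ≤ x * sm.prod := min_le_right _ _
            _ = sm.prod * x := mul_comm _ _
            _ ≤ t.prod * x := mul_le_mul_of_nonneg_right h2 hx
        · calc min (x * sM.prod) (x * sm.prod) ≤ x * sM.prod := min_le_left _ _
            _ = sM.prod * x := mul_comm _ _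
            _ ≤ t.prod * x := mul_le_mul_of_nonpos_right h1 hx
      calc min x (min (x * sM.prod) (x * sm.prod)) ≤ min (x * sM.prod) (x * sm.prod) :=
            min_le_right _ _
        _ ≤ t.prod * x := hgoal
        _ = (t ++ [x]).prod := by simp [List.prod_append]

theorem pvInvA_step (q : List Int) (st : Int × Int × Int) (x : Int)
    (h : pvInvA q st) : pvInvA (q ++ [x]) (pvStepA st x) := by
  obtain ⟨hM, hm, hg⟩ := h
  have hM' := pvEndMax_step q st.1 st.2.1 x hM hm
  have hm' := pvEndMin_step q st.1 st.2.1 x hM hm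
  refine ⟨hM', hm', ?_, ?_⟩
  · rcases min_choice st.2.2 (min x (min (x * st.1) (x * st.2.1))) with h1 | h1
    · obtain ⟨⟨li, hli, hlii, hgv⟩, _⟩ := hg
      refine ⟨li, hli, hlii.trans (List.prefix_append q [x]).isInfix, ?_⟩
      show min st.2.2 (min x (min (x * st.1) (x * st.2.1))) = li.prod
      rw [h1, hgv]
    · obtain ⟨⟨s, hs, hss, hsv⟩, _⟩ := hm'
      refine ⟨s, hs, hss.isInfix, ?_⟩
      show min st.2.2 (min x (min (x * st.1) (x * st.2.1))) = s.prod
      rw [h1, hsv]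
  · intro l hl hinf
    rcases pv_infix_snoc l q x hinf with hq | hsuf
    · exact le_trans (min_le_left _ _) (hg.2 l hl hq)
    · exact le_trans (min_le_right _ _) (hm'.2 l hl hsuf)

theorem pvInvA_fold (l q : List Int) (st : Int × Int × Int)
    (h : pvInvA q st) : pvInvA (q ++ l) (l.foldl pvStepA st) := by
  induction l generalizing q st with
  | nil => simpa using h
  | cons x xs ih =>
    have h2 := ih (q ++ [x]) (pvStepA st x) (pvInvA_step q st x h)
    simpa [List.append_assoc] using h2

theorem pv_suffix_singleton (s : List Int) (a : Int) (hs : s ≠ []) (h : s <:+ [a]) :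
    s = [a] := by
  rcases List.sublist_singleton.mp h.sublist with h1 | h1
  · exact absurd h1 hs
  · exact h1

theorem pvInvA_base (a : Int) : pvInvA [a] (a, a, a) := by
  refine ⟨⟨⟨[a], by simp, List.suffix_rfl, by simp⟩, ?_⟩,
          ⟨⟨[a], by simp, List.suffix_rfl, by simp⟩, ?_⟩,
          ⟨[a], by simp, List.infix_rfl, by simp⟩, ?_⟩
  · intro s hs hsx; rw [pv_suffix_singleton s a hs hsx]; simp
  · intro s hs hsx; rw [pv_suffix_singleton s a hs hsx]; simp
  · intro l hl hinf
    rcases List.sublist_singleton.mp hinf.sublist with h1 | h1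
    · exact absurd h1 hl
    · rw [h1]; simp

theorem pv_portA_eq (a : Int) (t : List Int) :
    min_product (a :: t) = (t.foldl pvStepA (a, a, a)).2.2 := by
  have h := PySem.List.foldl_pyRange_pyGetD' (a :: t) 0 pvStepA (a, a, a)
    (by norm_num : (0:Int) ≤ 1)
  have h2 : List.drop (1:Int).toNat (a :: t) = t := by norm_num
  rw [h2] at h
  simp only [min_product]
  exact congrArg (fun p : Int × Int × Int => p.2.2) h

theorem pvA_spec (a : Int) (t : List Int) :
    pvMinSpec (a :: t) (min_product (a :: t)) := by
  rw [pv_portA_eq]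
  have h := pvInvA_fold t [a] (a, a, a) (pvInvA_base a)
  simpa using h.2.2

-- ===== B side =====

theorem pv_inner_eq (s : List Int) (c g : Int) :
    s.foldl pvStepInner (c, g) = (c * s.prod, (pvPrefProds c s).foldl min g) := by
  induction s generalizing c g with
  | nil => simp [pvPrefProds]
  | cons x xs ih =>
    simp only [List.foldl_cons, pvStepInner, pvPrefProds, List.prod_cons]
    rw [ih (c * x) (min g (c * x))]
    simp [mul_assoc]

theorem pv_mem_prefProds (y c : Int) (s : List Int) :
    y ∈ pvPrefProds c s ↔ ∃ p, p ≠ [] ∧ p <+: s ∧ y = c * p.prod := by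
  induction s generalizing c y with
  | nil =>
    simp only [pvPrefProds, List.not_mem_nil, false_iff]
    rintro ⟨p, hp, hps, _⟩
    exact hp (List.prefix_nil.mp hps)
  | cons x xs ih =>
    simp only [pvPrefProds, List.mem_cons, ih]
    constructor
    · rintro (rfl | ⟨p, hp, hpx, rfl⟩)
      · exact ⟨[x], by simp, ⟨xs, rfl⟩, by simp⟩
      · refine ⟨x :: p, by simp, ?_, ?_⟩
        · exact List.cons_prefix_iff.mpr ⟨xs, rfl, hpx⟩
        · rw [List.prod_cons]; ring
    · rintro ⟨p, hp, hpx, rfl⟩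
      rcases p with _ | ⟨z, p'⟩
      · exact absurd rfl hp
      obtain ⟨l', hl', hp'⟩ := List.cons_prefix_iff.mp hpx
      obtain ⟨rfl, rfl⟩ : z = x ∧ l' = xs := by
        constructor <;> injection hl' with h1 h2 <;> simp [h1, h2]
      rcases eq_or_ne p' [] with rfl | hp''
      · left; simp
      · right
        exact ⟨p', hp'', hp', by rw [List.prod_cons]; ring⟩

def pvInvB (A : List Int) (k : Nat) (g : Int) : Prop :=
  (∃ l, l ≠ [] ∧ l <:+: A ∧ g = l.prod) ∧
  ∀ i, i < k → ∀ p, p ≠ [] → p <+: A.drop i → g ≤ p.prod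

theorem pvInvB_step (A : List Int) (k : Nat) (g : Int)
    (h : pvInvB A k g) : pvInvB A (k + 1) (pvOuterB A g k) := by
  have he : pvOuterB A g k = (pvPrefProds 1 (A.drop k)).foldl min g := by
    unfold pvOuterB; rw [pv_inner_eq]
  rw [he]
  constructor
  · rcases PySem.List.foldl_min_mem (pvPrefProds 1 (A.drop k)) g with hEq | hMem
    · rw [hEq]; exact h.1
    · obtain ⟨p, hp, hpre, hv⟩ := (pv_mem_prefProds _ _ _).mp hMem
      refine ⟨p, hp, ?_, ?_⟩
      · exact hpre.isInfix.trans (List.drop_suffix k A).isInfix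
      · rw [hv, one_mul]
  · intro i hi p hp hpre
    rcases Nat.lt_succ_iff_lt_or_eq.mp hi with hik | rfl
    · exact le_trans (PySem.List.foldl_min_le _ g).1 (h.2 i hik p hp hpre)
    · have hmem : (1:Int) * p.prod ∈ pvPrefProds 1 (A.drop i) :=
        (pv_mem_prefProds _ _ _).mpr ⟨p, hp, hpre, rfl⟩
      have := (PySem.List.foldl_min_le (pvPrefProds 1 (A.drop i)) g).2 _ hmem
      simpa using this

theorem pvInvB_fold (A : List Int) (g : Int) (h0 : pvInvB A 0 g) (n : Nat) :
    pvInvB A n ((List.range n).foldl (pvOuterB A) g) := by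
  induction n with
  | zero => simpa using h0
  | succ m ih =>
    rw [List.range_succ, List.foldl_append, List.foldl_cons, List.foldl_nil]
    exact pvInvB_step A m _ ih

theorem pv_infix_exists_drop (A l : List Int) (hl : l ≠ []) (h : l <:+: A) :
    ∃ i, i < A.length ∧ l <+: A.drop i := by
  obtain ⟨u, v, rfl⟩ := h
  refine ⟨u.length, ?_, ?_⟩
  · have : 1 ≤ l.length := List.length_pos_iff.mpr hl
    simp [List.length_append]; omega
  · rw [List.append_assoc, List.drop_left]
    exact ⟨v, rfl⟩

theorem pv_portB_eq (a : Int) (t : List Int) :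
    min_product_alt (a :: t) = (List.range (a :: t).length).foldl (pvOuterB (a :: t)) a := by
  simp only [min_product_alt]
  rw [PySem.List.pyRange_zero_nat, List.foldl_map]
  have hf : (fun (g : Int) (k : Nat) =>
      ((PySem.List.pyRange (k : Int) ((a :: t).length : Int) 1).foldl
        (fun (p : Int × Int) j =>
          (p.1 * PySem.List.pyGetD (a :: t) j 0,
           min p.2 (p.1 * PySem.List.pyGetD (a :: t) j 0))) (1, g)).2) = pvOuterB (a :: t) := by
    funext g k
    have h := PySem.List.foldl_pyRange_pyGetD' (a :: t) 0 pvStepInner (1, g)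
      (Int.natCast_nonneg k)
    simp only [Int.toNat_natCast] at h
    exact congrArg (fun p : Int × Int => p.2) h
  exact congrArg (fun f : Int → Nat → Int => List.foldl f a (List.range (a :: t).length)) hf

theorem pvB_spec (a : Int) (t : List Int) :
    pvMinSpec (a :: t) (min_product_alt (a :: t)) := by
  rw [pv_portB_eq]
  have h0 : pvInvB (a :: t) 0 a :=
    ⟨⟨[a], by simp, (List.prefix_append [a] t).isInfix, by simp⟩, by omega⟩
  have h := pvInvB_fold (a :: t) a h0 (a :: t).length
  refine ⟨h.1, ?_⟩
  intro l hl hinf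
  obtain ⟨i, hi, hpre⟩ := pv_infix_exists_drop (a :: t) l hl hinf
  exact h.2 i hi l hl hpre

-- ===== VERDICT (by name: the statement is the Claim_ definition above) =====
theorem min_product_spec : Claim_equal_min_product := by
  unfold Claim_equal_min_product
  intro A _
  unfold Spec_min_product
  cases A with
  | nil => rfl
  | cons a t => exact pvMinSpec_unique (a :: t) _ _ (pvA_spec a t) (pvB_spec a t)
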